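-- pv_equiv track=rewrite | github.com/wandb/wandb | wandb/controller.py | get_run_metrics
-- ===== SOURCE A (Python) =====
-- def get_run_metrics(runs):
--     metrics = {}
--     categories = ('running', 'finished', 'crashed', 'failed')
--     for r in runs:
--         state = r['state']
--         found = 'unknown'
--         for c in categories:
--             if state == c:
--                 found = c
--                 break
--         metrics.setdefault(found, 0)
--         metrics[found] += 1
--     return metrics
-- ===== SOURCE B (Python) =====
-- def get_run_metrics(runs):
--     counts = {}
--     for r in runs:
--         s = r['state']
--         counts[s] = counts.get(s, 0) + 1
--     categories = ('running', 'finished', 'crashed', 'failed')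
--     metrics = {}
--     for state, n in counts.items():
--         key = state if state in categories else 'unknown'
--         metrics[key] = metrics.get(key, 0) + n
--     return metrics
-- ===== Notes on version B (the rewrite author's own statement) =====
-- stated objective: alternative
-- what changed: B first builds a frequency table of the raw states in one pass and then folds that table into the four categories plus 'unknown', instead of A's per-run inner scan over the category tuple with setdefault-then-increment.
import Mathlib
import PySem

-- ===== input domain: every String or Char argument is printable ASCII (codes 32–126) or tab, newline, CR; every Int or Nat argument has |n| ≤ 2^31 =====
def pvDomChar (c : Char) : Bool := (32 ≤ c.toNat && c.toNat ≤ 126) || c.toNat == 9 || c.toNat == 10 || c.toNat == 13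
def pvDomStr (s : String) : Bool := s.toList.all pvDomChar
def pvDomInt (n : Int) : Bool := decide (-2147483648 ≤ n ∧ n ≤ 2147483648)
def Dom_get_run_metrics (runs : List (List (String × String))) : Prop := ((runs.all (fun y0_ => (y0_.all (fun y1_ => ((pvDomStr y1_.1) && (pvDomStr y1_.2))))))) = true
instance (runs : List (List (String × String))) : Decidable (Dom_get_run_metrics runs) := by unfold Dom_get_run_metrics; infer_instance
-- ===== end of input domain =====

-- B counts the raw states into a frequency table in one pass, then folds that table into the
-- four categories plus 'unknown' (objective: alternative decomposition, same O(n) cost).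


-- ===== PORT A =====
-- r['state'] (the same expression occurs in both Pythons); Pre_ excludes the KeyError case,
-- so the default "" is never reached on admitted inputs.
def pvStateGet (r : List (String × String)) : String := (PySem.Dict.mk r).getD "state" ""

-- the inner `for c in categories: if state == c: found = c; break` loop (found starts 'unknown')
def findCatA (state : String) : List String → String
  | [] => "unknown"
  | c :: cs => if state = c then c else findCatA state cs

def get_run_metrics (runs : List (List (String × String))) : List (String × Int) :=
  (runs.foldl
    (fun (metrics : PySem.Dict String Int) r =>
      let state := pvStateGet r
      let found := findCatA state ["running", "finished", "crashed", "failed"]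
      let m1 := metrics.setdefault found 0
      m1.insert found (m1.getD found 0 + 1))
    PySem.Dict.empty).items

-- ===== PORT B =====
-- `state if state in categories else 'unknown'`
def catB (s : String) : String :=
  if s ∈ ["running", "finished", "crashed", "failed"] then s else "unknown"

def get_run_metrics_alt (runs : List (List (String × String))) : List (String × Int) :=
  let counts := runs.foldl
    (fun (d : PySem.Dict String Int) r =>
      let s := pvStateGet r
      d.insert s (d.getD s 0 + 1))
    PySem.Dict.empty
  (counts.items.foldl
    (fun (m : PySem.Dict String Int) p =>
      let key := catB p.1
      m.insert key (m.getD key 0 + p.2))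
    PySem.Dict.empty).items

-- ===== PRECONDITION & SPEC =====
-- exactly the inputs on which the Python A returns: every run dict has a 'state' key (else KeyError)
def Pre_get_run_metrics (runs : List (List (String × String))) : Prop :=
  ∀ r ∈ runs, (PySem.Dict.mk r).contains "state" = true
instance (runs : List (List (String × String))) : Decidable (Pre_get_run_metrics runs) := by
  unfold Pre_get_run_metrics; infer_instance
def pvWitness_get_run_metrics : (List (List (String × String))) :=
  [[("state", "running")], [("state", "queued")]]
def Spec_get_run_metrics (runs : List (List (String × String))) (out : List (String × Int)) : Prop := out = get_run_metrics_alt runs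
instance (runs : List (List (String × String))) (out : List (String × Int)) : Decidable (Spec_get_run_metrics runs out) := by unfold Spec_get_run_metrics; infer_instance

-- ===== CLAIM (what is proved, stated in full; the proofs are below) =====
def Claim_equal_get_run_metrics : Prop := ∀ (runs : List (List (String × String))), Dom_get_run_metrics runs → Pre_get_run_metrics runs → Spec_get_run_metrics runs (get_run_metrics runs)

-- ===== LEMMAS AND PROOFS =====

-- A's inner category scan computes exactly B's membership-based classifier.
theorem findCatA_eq_catB (s : String) :
    findCatA s ["running", "finished", "crashed", "failed"] = catB s := by
  simp only [findCatA, catB, List.mem_cons, List.not_mem_nil, or_false]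
  split_ifs <;> simp_all

-- A's setdefault-then-increment step is the counting insert.
theorem stepA_eq (m : PySem.Dict String Int) (f : String) :
    (m.setdefault f 0).insert f ((m.setdefault f 0).getD f 0 + 1)
      = m.insert f (m.getD f 0 + 1) := by
  by_cases h : m.contains f = true
  · rw [PySem.Dict.setdefault_of_contains _ _ h]
  · have h' : m.contains f = false := by simpa using h
    rw [PySem.Dict.setdefault_of_not_contains _ _ h',
        PySem.Dict.getD_insert_self, PySem.Dict.insert_insert_self,
        PySem.Dict.getD_of_not_contains _ _ h']

-- membership is preserved by PySem.Set.update
theorem mem_update_of_mem {α : Type} [BEq α] [LawfulBEq α] (s : PySem.Set α) (m : List α)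
    (y : α) (hy : y ∈ s) : y ∈ PySem.Set.update s m := by
  induction m generalizing s with
  | nil => exact hy
  | cons x t ih =>
    exact ih _ ((PySem.Set.mem_add s x y).mpr (Or.inl hy))

theorem mem_update_of_mem_list {α : Type} [BEq α] [LawfulBEq α] (s : PySem.Set α) (m : List α)
    (y : α) (hy : y ∈ m) : y ∈ PySem.Set.update s m := by
  induction m generalizing s with
  | nil => cases hy
  | cons x t ih =>
    rcases List.mem_cons.mp hy with h | h
    · show y ∈ PySem.Set.update (s.add x) t
      exact mem_update_of_mem _ _ _ ((PySem.Set.mem_add s x y).mpr (Or.inr h))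
    · exact ih _ h

-- deduplicating before mapping does not change the deduplicated image (order included)
theorem update_map_update {α β : Type} [BEq α] [LawfulBEq α] [BEq β] [LawfulBEq β]
    (f : α → β) (l : List α) (t : PySem.Set α) (s : PySem.Set β) :
    PySem.Set.update s ((PySem.Set.update t l).map f)
      = PySem.Set.update (PySem.Set.update s (t.map f)) (l.map f) := by
  induction l generalizing t s with
  | nil => rfl
  | cons x l ih =>
    have hstep : PySem.Set.update s ((PySem.Set.add t x).map f)
        = PySem.Set.add (PySem.Set.update s (t.map f)) (f x) := by
      by_cases h : t.contains x = true
      · have hx : x ∈ t := by simpa using h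
        have hmem : f x ∈ PySem.Set.update s (t.map f) :=
          mem_update_of_mem_list _ _ _ (List.mem_map_of_mem hx)
        simp [PySem.Set.add, hx, hmem]
      · have hx' : x ∉ t := by simpa [List.contains_iff_mem] using h
        simp [PySem.Set.add, hx', PySem.Set.update, List.foldl_append]
    calc PySem.Set.update s ((PySem.Set.update (PySem.Set.add t x) l).map f)
        = PySem.Set.update (PySem.Set.update s ((PySem.Set.add t x).map f)) (l.map f) := ih _ _
      _ = PySem.Set.update (PySem.Set.add (PySem.Set.update s (t.map f)) (f x)) (l.map f) := by
            rw [hstep]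

theorem ofList_map_ofList {α β : Type} [BEq α] [LawfulBEq α] [BEq β] [LawfulBEq β]
    (f : α → β) (l : List α) :
    PySem.Set.ofList ((PySem.Set.ofList l).map f) = PySem.Set.ofList (l.map f) := by
  have h := update_map_update f l (PySem.Set.empty) (PySem.Set.empty)
  simpa [PySem.Set.ofList, PySem.Set.update, PySem.Set.empty] using h

-- getD after B's second-phase fold: start value plus the sum of the counts in k's fiber
theorem getD_phase2 (l : List (String × Int)) (m : PySem.Dict String Int) (k : String) :
    (l.foldl (fun m p => m.insert (catB p.1) (m.getD (catB p.1) 0 + p.2)) m).getD k 0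
      = m.getD k 0 + ((l.filter (fun p => catB p.1 == k)).map (·.2)).sum := by
  induction l generalizing m with
  | nil => simp
  | cons p l ih =>
    simp only [List.foldl_cons, ih, List.filter_cons]
    by_cases h : catB p.1 = k
    · subst h
      simp [PySem.Dict.getD_insert_self, add_assoc]
    · have hne : (catB p.1 == k) = false := by simpa using h
      rw [PySem.Dict.getD_insert_of_ne _ _ _ (show k ≠ catB p.1 from fun hk => h hk.symm)]
      simp [hne]

-- the deduplicated fiber sum of counts is the count of the mapped list
theorem fiber_sum (l : List String) (k : String) :
    ((((PySem.Set.ofList l).filter (fun s => catB s == k)).map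
        (fun s => (l.count s : Int))).sum)
      = ((l.map catB).count k : Int) := by
  have hperm : (PySem.Set.ofList l).Perm l.dedup :=
    (List.perm_ext_iff_of_nodup (PySem.Set.nodup_ofList l) l.nodup_dedup).mpr
      (fun a => by simp [PySem.Set.mem_ofList, List.mem_dedup])
  have h1 : ((((PySem.Set.ofList l).filter (fun s => catB s == k)).map
      (fun s => (l.count s : Int))).sum)
      = (((l.dedup.filter (fun s => catB s == k)).map (fun s => (l.count s : Int))).sum) :=
    ((hperm.filter _).map _).sum_eq
  have h2 : (((l.dedup.filter (fun s => catB s == k)).map (fun s => (l.count s : Int))).sum)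
      = (((l.dedup.filter (fun s => catB s == k)).map (fun s => l.count s)).sum : Int) := by
    induction (l.dedup.filter (fun s => catB s == k)) with
    | nil => simp
    | cons a t iht => simp [iht]
  rw [h1, h2, List.sum_map_count_dedup_filter_eq_countP]
  rw [List.count_eq_countP, List.countP_map]
  rfl

-- A's whole fold in counting-insert form over the mapped category list
theorem A_fold_eq (runs : List (List (String × String))) :
    get_run_metrics runs
      = (((runs.map pvStateGet).map catB).foldl
          (fun m y => m.insert y (m.getD y 0 + 1)) PySem.Dict.empty).items := by
  unfold get_run_metrics
  rw [List.map_map, List.foldl_map]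
  congr 1
  apply PySem.List.foldl_congr_mem
  intro acc r _
  simp only [Function.comp, findCatA_eq_catB, stepA_eq]

-- B's counter phase is PySem.Dict.counter of the state list
theorem B_counts_eq (runs : List (List (String × String))) :
    runs.foldl
      (fun (d : PySem.Dict String Int) r =>
        let s := pvStateGet r
        d.insert s (d.getD s 0 + 1)) PySem.Dict.empty
      = PySem.Dict.counter (runs.map pvStateGet) := by
  rw [← PySem.Dict.foldl_insert_getD_add_one_eq_counter, List.foldl_map]

-- the two result dictionaries agree on every key
theorem getD_agree (l : List String) (k : String) :
    (((l.map catB).foldl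
        (fun (m : PySem.Dict String Int) y => m.insert y (m.getD y 0 + 1))
        PySem.Dict.empty).getD k 0)
      = (((PySem.Dict.counter l).items.foldl
          (fun (m : PySem.Dict String Int) p =>
            m.insert (catB p.1) (m.getD (catB p.1) 0 + p.2)) PySem.Dict.empty).getD k 0) := by
  rw [PySem.Dict.getD_foldl_insert_add_one, getD_phase2, PySem.Dict.getD_empty,
      PySem.Dict.items_counter, List.filter_map, List.map_map]
  simp only [Function.comp_def]
  rw [fiber_sum]

-- the two result dictionaries have the same key list
theorem keys_agree (l : List String) :
    ((l.map catB).foldl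
        (fun (m : PySem.Dict String Int) y => m.insert y (m.getD y 0 + 1))
        PySem.Dict.empty).keys
      = ((PySem.Dict.counter l).items.foldl
          (fun (m : PySem.Dict String Int) p =>
            m.insert (catB p.1) (m.getD (catB p.1) 0 + p.2)) PySem.Dict.empty).keys := by
  rw [PySem.Dict.keys_foldl_insert,
      PySem.Dict.keys_foldl_insert_key _ (fun p : String × Int => catB p.1),
      PySem.Dict.items_counter, List.map_map]
  simp only [Function.comp_def]
  have h := ofList_map_ofList catB l
  simpa [PySem.Set.ofList, PySem.Set.update, PySem.Set.empty, PySem.Dict.keys_empty] using h.symm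

theorem B_eq (runs : List (List (String × String))) :
    get_run_metrics_alt runs
      = ((PySem.Dict.counter (runs.map pvStateGet)).items.foldl
          (fun (m : PySem.Dict String Int) p =>
            m.insert (catB p.1) (m.getD (catB p.1) 0 + p.2)) PySem.Dict.empty).items := by
  unfold get_run_metrics_alt
  rw [B_counts_eq]

theorem main_eq (runs : List (List (String × String))) :
    get_run_metrics runs = get_run_metrics_alt runs := by
  rw [A_fold_eq, B_eq]
  set dA := (((runs.map pvStateGet).map catB).foldl
      (fun (m : PySem.Dict String Int) y => m.insert y (m.getD y 0 + 1))
      PySem.Dict.empty) with hdA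
  set dB := ((PySem.Dict.counter (runs.map pvStateGet)).items.foldl
      (fun (m : PySem.Dict String Int) p =>
        m.insert (catB p.1) (m.getD (catB p.1) 0 + p.2)) PySem.Dict.empty) with hdB
  have hndA : dA.keys.Nodup := by
    rw [hdA]
    exact PySem.Dict.nodup_keys_foldl_insert _ _ _ (by simp [PySem.Dict.keys_empty])
  have hndB : dB.keys.Nodup := by
    rw [hdB]
    exact PySem.Dict.nodup_keys_foldl_insert_key _ _ _ _ (by simp [PySem.Dict.keys_empty])
  rw [PySem.Dict.items_eq_map_keys dA hndA 0, PySem.Dict.items_eq_map_keys dB hndB 0,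
      hdA, hdB, keys_agree (runs.map pvStateGet)]
  exact List.map_congr_left (fun k _ => by rw [getD_agree (runs.map pvStateGet) k])

-- ===== VERDICT (by name: the statement is the Claim_ definition above) =====
theorem get_run_metrics_spec : Claim_equal_get_run_metrics := by
  intro runs _ _
  unfold Spec_get_run_metrics
  exact main_eq runs
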